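-- pv_equiv track=rewrite | github.com/moraivanec/TPS-AyED1 | Trabajo Practico N3/Ejercicio_1.py | columnas_palindromas
-- ===== SOURCE A (Python) =====
-- def columnas_palindromas(matriz):
--     """
--     Precondiciones:
--     - 'matriz' debe ser una lista de listas.
--
--     Postcondiciones:
--     - Devuelve una lista de índices de columnas que son palíndromas.
--     """
--     palindromas = []
--     tamanio = len(matriz)
--     for columna in range(tamanio):
--         es_palindromo = True
--         for i in range(tamanio // 2):  # Solo itero hasta la mitad
--             if matriz[i][columna] != matriz[tamanio - 1 - i][columna]:
--                 es_palindromo = False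
--                 break
--         if es_palindromo:
--             palindromas.append(columna + 1)  # +1 para mostrar la columna en base 1
--     return palindromas
-- ===== SOURCE B (Python) =====
-- def columnas_palindromas(matriz):
--     """Simpler: build each column as a list and compare to its reverse."""
--     n = len(matriz)
--     res = []
--     for columna in range(n):
--         col = [matriz[i][columna] for i in range(n)]
--         if col == col[::-1]:
--             res.append(columna + 1)
--     return res
-- ===== Notes on version B (the rewrite author's own statement) =====
-- stated objective: simpler
-- what changed: B materializes each whole column and tests it against its reverse, replacing A's half-length pairwise index comparison with early break.
-- outside the precondition, e.g. on columnas_palindromas([[1, 2, 3], [9], [1, 2, 3]]): A returns [1, 2, 3], B raises IndexError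
import Mathlib
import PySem

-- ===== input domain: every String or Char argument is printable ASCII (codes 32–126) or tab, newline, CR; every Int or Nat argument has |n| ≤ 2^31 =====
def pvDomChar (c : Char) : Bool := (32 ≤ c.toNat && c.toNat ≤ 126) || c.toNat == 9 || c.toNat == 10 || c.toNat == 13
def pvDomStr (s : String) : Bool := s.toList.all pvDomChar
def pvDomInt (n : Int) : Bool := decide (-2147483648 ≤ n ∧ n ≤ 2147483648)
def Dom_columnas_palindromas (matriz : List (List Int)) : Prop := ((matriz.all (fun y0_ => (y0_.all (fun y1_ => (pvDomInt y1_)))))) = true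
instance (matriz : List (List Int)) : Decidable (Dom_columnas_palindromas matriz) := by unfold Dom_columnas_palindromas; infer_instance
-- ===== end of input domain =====

-- B replaces A's half-length pairwise comparison (with early break) by building each
-- whole column and comparing it to its reverse; objective: simpler.

-- ===== PORT A =====
-- inner 'for i in range(tamanio // 2)' with break-on-mismatch
def pvCheckA (matriz : List (List Int)) (n c : Int) : List Int → Bool
  | [] => true
  | i :: rest =>
      if PySem.List.pyGetD (PySem.List.pyGetD matriz i []) c 0 ≠
         PySem.List.pyGetD (PySem.List.pyGetD matriz (n - 1 - i) []) c 0
      then false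
      else pvCheckA matriz n c rest

def columnas_palindromas (matriz : List (List Int)) : List Int :=
  let tamanio : Int := matriz.length
  (PySem.List.pyRange 0 tamanio 1).foldl
    (fun palindromas columna =>
      if pvCheckA matriz tamanio columna
           (PySem.List.pyRange 0 (PySem.Int.floordiv tamanio 2) 1)
      then palindromas ++ [columna + 1] else palindromas) []

-- ===== PORT B =====
def columnas_palindromas_alt (matriz : List (List Int)) : List Int :=
  let n : Int := matriz.length
  (PySem.List.pyRange 0 n 1).foldl
    (fun res columna =>
      let col := (PySem.List.pyRange 0 n 1).map
        (fun i => PySem.List.pyGetD (PySem.List.pyGetD matriz i []) columna 0)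
      -- col[::-1] is List.reverse (exact)
      if col = col.reverse then res ++ [columna + 1] else res) []

-- ===== PRECONDITION & SPEC =====
-- Pre_ excludes ragged matrices with a row shorter than len(matriz): there Python A
-- raises IndexError, except when only the (unread) middle row of an odd-sized matrix
-- is short — a ragged corner where A still returns but B naturally raises IndexError.
def Pre_columnas_palindromas (matriz : List (List Int)) : Prop :=
  (matriz.all (fun row => matriz.length ≤ row.length)) = true
instance (matriz : List (List Int)) : Decidable (Pre_columnas_palindromas matriz) := by
  unfold Pre_columnas_palindromas; infer_instance

def pvWitness_columnas_palindromas : List (List Int) := [[1, 2], [2, 1]]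

def Spec_columnas_palindromas (matriz : List (List Int)) (out : List Int) : Prop := out = columnas_palindromas_alt matriz
instance (matriz : List (List Int)) (out : List Int) : Decidable (Spec_columnas_palindromas matriz out) := by unfold Spec_columnas_palindromas; infer_instance

-- ===== CLAIM (what is proved, stated in full; the proofs are below) =====
def Claim_equal_columnas_palindromas : Prop := ∀ (matriz : List (List Int)), Dom_columnas_palindromas matriz → Pre_columnas_palindromas matriz → Spec_columnas_palindromas matriz (columnas_palindromas matriz)

-- ===== LEMMAS AND PROOFS =====

-- the break-loop is the 'all' of the pairwise tests
theorem pvCheckA_eq_all (matriz : List (List Int)) (n c : Int) (l : List Int) :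
    pvCheckA matriz n c l =
      l.all (fun i => PySem.List.pyGetD (PySem.List.pyGetD matriz i []) c 0 ==
                      PySem.List.pyGetD (PySem.List.pyGetD matriz (n - 1 - i) []) c 0) := by
  induction l with
  | nil => rfl
  | cons i rest ih =>
      simp only [pvCheckA, List.all_cons, ih]
      by_cases h : PySem.List.pyGetD (PySem.List.pyGetD matriz i []) c 0 =
                   PySem.List.pyGetD (PySem.List.pyGetD matriz (n - 1 - i) []) c 0 <;>
        simp [h]

theorem rev_map_range (g : Nat → Int) (n : Nat) :
    ((List.range n).map g).reverse = (List.range n).map (fun k => g (n - 1 - k)) := by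
  apply List.ext_getElem <;> simp [List.getElem_reverse]

-- a length-n list built from g is a palindrome iff the first half matches the second
theorem pal_iff (g : Nat → Int) (n : Nat) :
    ((List.range n).map g = ((List.range n).map g).reverse) ↔
      ∀ i < n / 2, g i = g (n - 1 - i) := by
  rw [rev_map_range]
  constructor
  · intro h i hi
    have hi' : i < n := by omega
    have h2 := congrArg (fun xs => xs[i]?) h
    simp only [List.getElem?_map, List.getElem?_range hi'] at h2
    simpa using h2
  · intro h
    apply List.ext_getElem <;> simp
    intro k hk
    by_cases h1 : k < n / 2
    · exact h k h1
    · by_cases h2 : n - 1 - k < n / 2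
      · have := h (n - 1 - k) h2
        rw [show n - 1 - (n - 1 - k) = k by omega] at this
        exact this.symm
      · have : k = n - 1 - k := by omega
        rw [← this]

theorem columns_agree (matriz : List (List Int)) (c : Int) :
    pvCheckA matriz (matriz.length : Int) c
        (PySem.List.pyRange 0 (PySem.Int.floordiv (matriz.length : Int) 2) 1) = true ↔
      ((PySem.List.pyRange 0 (matriz.length : Int) 1).map
          (fun i => PySem.List.pyGetD (PySem.List.pyGetD matriz i []) c 0) =
        ((PySem.List.pyRange 0 (matriz.length : Int) 1).map
          (fun i => PySem.List.pyGetD (PySem.List.pyGetD matriz i []) c 0)).reverse) := by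
  have hr : PySem.Int.floordiv ((matriz.length : Nat) : Int) 2 = ((matriz.length / 2 : Nat) : Int) := by
    exact_mod_cast PySem.Int.floordiv_natCast matriz.length 2
  rw [pvCheckA_eq_all, hr, PySem.List.pyRange_zero_natCast, PySem.List.pyRange_zero_natCast,
      List.map_map, List.all_map]
  simp only [Function.comp_def]
  rw [pal_iff (fun k => PySem.List.pyGetD (PySem.List.pyGetD matriz (k : Int) []) c 0) matriz.length]
  simp only [List.all_eq_true, List.mem_range, beq_iff_eq]
  constructor
  · intro h i hi
    have := h i hi
    rwa [show ((matriz.length : Int) - 1 - (i : Int)) = ((matriz.length - 1 - i : Nat) : Int) from by omega] at this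
  · intro h i hi
    have := h i hi
    rwa [show ((matriz.length : Int) - 1 - (i : Int)) = ((matriz.length - 1 - i : Nat) : Int) from by omega]

-- ===== VERDICT (by name: the statement is the Claim_ definition above) =====
theorem columnas_palindromas_spec : Claim_equal_columnas_palindromas := by
  intro matriz _ _
  unfold Spec_columnas_palindromas
  simp only [columnas_palindromas, columnas_palindromas_alt]
  apply PySem.List.foldl_congr_mem
  intro acc c _
  exact if_congr (columns_agree matriz c) rfl rfl
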